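-- pv_equiv track=rewrite | github.com/PythonicDG/RAG-Based-Chatbot | app.py | _get_language_instruction
-- ===== SOURCE A (Python) =====
-- SUPPORTED_LANGUAGES = {
--     "en": {"name": "English",    "instruction": "English"},
--     "hi": {"name": "Hindi",      "instruction": "Hindi (हिन्दी)"},
--     "mr": {"name": "Marathi",    "instruction": "Marathi (मराठी)"},
--     "ta": {"name": "Tamil",      "instruction": "Tamil (தமிழ்)"},
--     "te": {"name": "Telugu",     "instruction": "Telugu (తెలుగు)"},
--     "bn": {"name": "Bengali",    "instruction": "Bengali (বাংলা)"},
--     "gu": {"name": "Gujarati",   "instruction": "Gujarati (ગુજરાતી)"},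
--     "kn": {"name": "Kannada",    "instruction": "Kannada (ಕನ್ನಡ)"},
--     "ml": {"name": "Malayalam",  "instruction": "Malayalam (മലയാളം)"},
--     "pa": {"name": "Punjabi",    "instruction": "Punjabi (ਪੰਜਾਬੀ)"},
--     "es": {"name": "Spanish",    "instruction": "Spanish (Español)"},
--     "fr": {"name": "French",     "instruction": "French (Français)"},
--     "de": {"name": "German",     "instruction": "German (Deutsch)"},
--     "zh": {"name": "Chinese",    "instruction": "Chinese (中文)"},
--     "ja": {"name": "Japanese",   "instruction": "Japanese (日本語)"},
--     "ar": {"name": "Arabic",     "instruction": "Arabic (العربية)"},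
--     "pt": {"name": "Portuguese", "instruction": "Portuguese (Português)"},
-- }
--
-- DEFAULT_LANGUAGE = "en"
--
-- def _get_language_instruction(lang_code: str) -> str:
--     """Resolve a language code to its LLM instruction label, with safe fallback."""
--     lang_code = (lang_code or DEFAULT_LANGUAGE).strip().lower()
--     lang_entry = SUPPORTED_LANGUAGES.get(lang_code)
--     if lang_entry:
--         return lang_entry["instruction"]
--     # Fallback: if someone sends a full name like "Hindi", attempt reverse lookup
--     for code, entry in SUPPORTED_LANGUAGES.items():
--         if entry["name"].lower() == lang_code:
--             return entry["instruction"]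
--     return SUPPORTED_LANGUAGES[DEFAULT_LANGUAGE]["instruction"]
-- ===== SOURCE B (Python) =====
-- # Single precomputed lookup table: each language code AND each lowercased
-- # language name maps directly to its instruction label; one dict.get replaces
-- # the two-phase lookup-then-scan of the original.
-- _DEFAULT_INSTRUCTION = "English"
--
-- _LOOKUP = {
--     "en": "English",              "english": "English",
--     "hi": "Hindi (हिन्दी)",        "hindi": "Hindi (हिन्दी)",
--     "mr": "Marathi (मराठी)",       "marathi": "Marathi (मराठी)",
--     "ta": "Tamil (தமிழ்)",         "tamil": "Tamil (தமிழ்)",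
--     "te": "Telugu (తెలుగు)",       "telugu": "Telugu (తెలుగు)",
--     "bn": "Bengali (বাংলা)",       "bengali": "Bengali (বাংলা)",
--     "gu": "Gujarati (ગુજરાતી)",    "gujarati": "Gujarati (ગુજરાતી)",
--     "kn": "Kannada (ಕನ್ನಡ)",       "kannada": "Kannada (ಕನ್ನಡ)",
--     "ml": "Malayalam (മലയാളം)",    "malayalam": "Malayalam (മലയാളം)",
--     "pa": "Punjabi (ਪੰਜਾਬੀ)",      "punjabi": "Punjabi (ਪੰਜਾਬੀ)",
--     "es": "Spanish (Español)",    "spanish": "Spanish (Español)",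
--     "fr": "French (Français)",    "french": "French (Français)",
--     "de": "German (Deutsch)",     "german": "German (Deutsch)",
--     "zh": "Chinese (中文)",        "chinese": "Chinese (中文)",
--     "ja": "Japanese (日本語)",     "japanese": "Japanese (日本語)",
--     "ar": "Arabic (العربية)",      "arabic": "Arabic (العربية)",
--     "pt": "Portuguese (Português)", "portuguese": "Portuguese (Português)",
-- }
--
-- def _get_language_instruction(lang_code: str) -> str:
--     key = (lang_code or "en").strip().lower()
--     return _LOOKUP.get(key, _DEFAULT_INSTRUCTION)
-- ===== Notes on version B (the rewrite author's own statement) =====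
-- stated objective: simpler
-- what changed: Replaces A's two-phase resolution (dict lookup on codes, then a linear scan over entries comparing lowercased names) with a single get on one precomputed table that maps every code and every lowercased name directly to its instruction.
import Mathlib
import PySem

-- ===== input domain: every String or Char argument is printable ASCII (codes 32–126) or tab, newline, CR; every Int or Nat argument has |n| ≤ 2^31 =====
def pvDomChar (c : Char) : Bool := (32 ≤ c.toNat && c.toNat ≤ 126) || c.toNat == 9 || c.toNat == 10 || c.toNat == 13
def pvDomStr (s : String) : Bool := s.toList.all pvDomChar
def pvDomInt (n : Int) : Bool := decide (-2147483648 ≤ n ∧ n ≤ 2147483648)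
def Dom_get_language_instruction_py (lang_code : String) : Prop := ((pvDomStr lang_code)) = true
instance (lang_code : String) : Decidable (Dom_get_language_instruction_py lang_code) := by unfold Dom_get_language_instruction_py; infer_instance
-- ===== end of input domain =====

-- B replaces A's two-phase code-lookup-then-name-scan with a single get on one
-- precomputed table mapping every code and lowercased name to its instruction (objective: simpler).
-- ===== PORT A =====
def pvSupportedLanguages : PySem.Dict String (PySem.Dict String String) :=
  PySem.Dict.ofList [
    ("en", PySem.Dict.ofList [("name", "English"), ("instruction", "English")]),
    ("hi", PySem.Dict.ofList [("name", "Hindi"), ("instruction", "Hindi (हिन्दी)")]),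
    ("mr", PySem.Dict.ofList [("name", "Marathi"), ("instruction", "Marathi (मराठी)")]),
    ("ta", PySem.Dict.ofList [("name", "Tamil"), ("instruction", "Tamil (தமிழ்)")]),
    ("te", PySem.Dict.ofList [("name", "Telugu"), ("instruction", "Telugu (తెలుగు)")]),
    ("bn", PySem.Dict.ofList [("name", "Bengali"), ("instruction", "Bengali (বাংলা)")]),
    ("gu", PySem.Dict.ofList [("name", "Gujarati"), ("instruction", "Gujarati (ગુજરાતી)")]),
    ("kn", PySem.Dict.ofList [("name", "Kannada"), ("instruction", "Kannada (ಕನ್ನಡ)")]),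
    ("ml", PySem.Dict.ofList [("name", "Malayalam"), ("instruction", "Malayalam (മലയാളം)")]),
    ("pa", PySem.Dict.ofList [("name", "Punjabi"), ("instruction", "Punjabi (ਪੰਜਾਬੀ)")]),
    ("es", PySem.Dict.ofList [("name", "Spanish"), ("instruction", "Spanish (Español)")]),
    ("fr", PySem.Dict.ofList [("name", "French"), ("instruction", "French (Français)")]),
    ("de", PySem.Dict.ofList [("name", "German"), ("instruction", "German (Deutsch)")]),
    ("zh", PySem.Dict.ofList [("name", "Chinese"), ("instruction", "Chinese (中文)")]),
    ("ja", PySem.Dict.ofList [("name", "Japanese"), ("instruction", "Japanese (日本語)")]),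
    ("ar", PySem.Dict.ofList [("name", "Arabic"), ("instruction", "Arabic (العربية)")]),
    ("pt", PySem.Dict.ofList [("name", "Portuguese"), ("instruction", "Portuguese (Português)")])]

def pvDefaultLanguage : String := "en"

-- A's fallback for-loop over SUPPORTED_LANGUAGES.items() (keys "name"/"instruction"
-- are always present, so getD with default "" is exact here)
def pvReverseScan (lc : String) : List (String × PySem.Dict String String) → Option String
  | [] => none
  | (_, entry) :: rest =>
    if PySem.Str.lower (entry.getD "name" "") == lc then some (entry.getD "instruction" "")
    else pvReverseScan lc rest

-- body of A after the normalizing reassignment of lang_code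
def pvACore (lc : String) : String :=
  let lang_entry := pvSupportedLanguages.get? lc
  -- `if lang_entry:` — truthy iff present and (as a dict) non-empty
  if (match lang_entry with | some d => !d.items.isEmpty | none => false) then
    (lang_entry.getD PySem.Dict.empty).getD "instruction" ""
  else
    match pvReverseScan lc pvSupportedLanguages.items with
    | some instr => instr
    | none => (pvSupportedLanguages.getD pvDefaultLanguage PySem.Dict.empty).getD "instruction" ""

def get_language_instruction_py (lang_code : String) : String :=
  pvACore (PySem.Str.lower (PySem.Str.strip (if lang_code == "" then pvDefaultLanguage else lang_code)))

-- ===== PORT B =====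
def pvDefaultInstruction : String := "English"

def pvLookup : PySem.Dict String String :=
  PySem.Dict.ofList [
    ("en", "English"), ("english", "English"),
    ("hi", "Hindi (हिन्दी)"), ("hindi", "Hindi (हिन्दी)"),
    ("mr", "Marathi (मराठी)"), ("marathi", "Marathi (मराठी)"),
    ("ta", "Tamil (தமிழ்)"), ("tamil", "Tamil (தமிழ்)"),
    ("te", "Telugu (తెలుగు)"), ("telugu", "Telugu (తెలుగు)"),
    ("bn", "Bengali (বাংলা)"), ("bengali", "Bengali (বাংলা)"),
    ("gu", "Gujarati (ગુજરાતી)"), ("gujarati", "Gujarati (ગુજરાતી)"),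
    ("kn", "Kannada (ಕನ್ನಡ)"), ("kannada", "Kannada (ಕನ್ನಡ)"),
    ("ml", "Malayalam (മലയാളം)"), ("malayalam", "Malayalam (മലയാളം)"),
    ("pa", "Punjabi (ਪੰਜਾਬੀ)"), ("punjabi", "Punjabi (ਪੰਜਾਬੀ)"),
    ("es", "Spanish (Español)"), ("spanish", "Spanish (Español)"),
    ("fr", "French (Français)"), ("french", "French (Français)"),
    ("de", "German (Deutsch)"), ("german", "German (Deutsch)"),
    ("zh", "Chinese (中文)"), ("chinese", "Chinese (中文)"),
    ("ja", "Japanese (日本語)"), ("japanese", "Japanese (日本語)"),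
    ("ar", "Arabic (العربية)"), ("arabic", "Arabic (العربية)"),
    ("pt", "Portuguese (Português)"), ("portuguese", "Portuguese (Português)")]

def pvBCore (key : String) : String :=
  pvLookup.getD key pvDefaultInstruction

def get_language_instruction_py_alt (lang_code : String) : String :=
  pvBCore (PySem.Str.lower (PySem.Str.strip (if lang_code == "" then "en" else lang_code)))

-- ===== PRECONDITION & SPEC =====
def Spec_get_language_instruction_py (lang_code : String) (out : String) : Prop := out = get_language_instruction_py_alt lang_code
instance (lang_code : String) (out : String) : Decidable (Spec_get_language_instruction_py lang_code out) := by unfold Spec_get_language_instruction_py; infer_instance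

-- ===== CLAIM (what is proved, stated in full; the proofs are below) =====
def Claim_equal_get_language_instruction_py : Prop := ∀ (lang_code : String), Dom_get_language_instruction_py lang_code → Spec_get_language_instruction_py lang_code (get_language_instruction_py lang_code)

-- ===== LEMMAS AND PROOFS =====
theorem pvCore_eq (lc : String) : pvACore lc = pvBCore lc := by
  by_cases h0 : ("en" : String) = lc
  · subst h0; decide
  by_cases h1 : ("hi" : String) = lc
  · subst h1; decide
  by_cases h2 : ("mr" : String) = lc
  · subst h2; decide
  by_cases h3 : ("ta" : String) = lc
  · subst h3; decide
  by_cases h4 : ("te" : String) = lc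
  · subst h4; decide
  by_cases h5 : ("bn" : String) = lc
  · subst h5; decide
  by_cases h6 : ("gu" : String) = lc
  · subst h6; decide
  by_cases h7 : ("kn" : String) = lc
  · subst h7; decide
  by_cases h8 : ("ml" : String) = lc
  · subst h8; decide
  by_cases h9 : ("pa" : String) = lc
  · subst h9; decide
  by_cases h10 : ("es" : String) = lc
  · subst h10; decide
  by_cases h11 : ("fr" : String) = lc
  · subst h11; decide
  by_cases h12 : ("de" : String) = lc
  · subst h12; decide
  by_cases h13 : ("zh" : String) = lc
  · subst h13; decide
  by_cases h14 : ("ja" : String) = lc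
  · subst h14; decide
  by_cases h15 : ("ar" : String) = lc
  · subst h15; decide
  by_cases h16 : ("pt" : String) = lc
  · subst h16; decide
  by_cases h17 : ("english" : String) = lc
  · subst h17; decide
  by_cases h18 : ("hindi" : String) = lc
  · subst h18; decide
  by_cases h19 : ("marathi" : String) = lc
  · subst h19; decide
  by_cases h20 : ("tamil" : String) = lc
  · subst h20; decide
  by_cases h21 : ("telugu" : String) = lc
  · subst h21; decide
  by_cases h22 : ("bengali" : String) = lc
  · subst h22; decide
  by_cases h23 : ("gujarati" : String) = lc
  · subst h23; decide
  by_cases h24 : ("kannada" : String) = lc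
  · subst h24; decide
  by_cases h25 : ("malayalam" : String) = lc
  · subst h25; decide
  by_cases h26 : ("punjabi" : String) = lc
  · subst h26; decide
  by_cases h27 : ("spanish" : String) = lc
  · subst h27; decide
  by_cases h28 : ("french" : String) = lc
  · subst h28; decide
  by_cases h29 : ("german" : String) = lc
  · subst h29; decide
  by_cases h30 : ("chinese" : String) = lc
  · subst h30; decide
  by_cases h31 : ("japanese" : String) = lc
  · subst h31; decide
  by_cases h32 : ("arabic" : String) = lc
  · subst h32; decide
  by_cases h33 : ("portuguese" : String) = lc
  · subst h33; decide
  have eOf : pvSupportedLanguages = PySem.Dict.mk [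
      ("en", PySem.Dict.mk [("name", "English"), ("instruction", "English")]),
      ("hi", PySem.Dict.mk [("name", "Hindi"), ("instruction", "Hindi (हिन्दी)")]),
      ("mr", PySem.Dict.mk [("name", "Marathi"), ("instruction", "Marathi (मराठी)")]),
      ("ta", PySem.Dict.mk [("name", "Tamil"), ("instruction", "Tamil (தமிழ்)")]),
      ("te", PySem.Dict.mk [("name", "Telugu"), ("instruction", "Telugu (తెలుగు)")]),
      ("bn", PySem.Dict.mk [("name", "Bengali"), ("instruction", "Bengali (বাংলা)")]),
      ("gu", PySem.Dict.mk [("name", "Gujarati"), ("instruction", "Gujarati (ગુજરાતી)")]),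
      ("kn", PySem.Dict.mk [("name", "Kannada"), ("instruction", "Kannada (ಕನ್ನಡ)")]),
      ("ml", PySem.Dict.mk [("name", "Malayalam"), ("instruction", "Malayalam (മലയാളം)")]),
      ("pa", PySem.Dict.mk [("name", "Punjabi"), ("instruction", "Punjabi (ਪੰਜਾਬੀ)")]),
      ("es", PySem.Dict.mk [("name", "Spanish"), ("instruction", "Spanish (Español)")]),
      ("fr", PySem.Dict.mk [("name", "French"), ("instruction", "French (Français)")]),
      ("de", PySem.Dict.mk [("name", "German"), ("instruction", "German (Deutsch)")]),
      ("zh", PySem.Dict.mk [("name", "Chinese"), ("instruction", "Chinese (中文)")]),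
      ("ja", PySem.Dict.mk [("name", "Japanese"), ("instruction", "Japanese (日本語)")]),
      ("ar", PySem.Dict.mk [("name", "Arabic"), ("instruction", "Arabic (العربية)")]),
      ("pt", PySem.Dict.mk [("name", "Portuguese"), ("instruction", "Portuguese (Português)")])] := by decide
  have eLk : pvLookup = PySem.Dict.mk [
      ("en", "English"), ("english", "English"),
      ("hi", "Hindi (हिन्दी)"), ("hindi", "Hindi (हिन्दी)"),
      ("mr", "Marathi (मराठी)"), ("marathi", "Marathi (मराठी)"),
      ("ta", "Tamil (தமிழ்)"), ("tamil", "Tamil (தமிழ்)"),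
      ("te", "Telugu (తెలుగు)"), ("telugu", "Telugu (తెలుగు)"),
      ("bn", "Bengali (বাংলা)"), ("bengali", "Bengali (বাংলা)"),
      ("gu", "Gujarati (ગુજરાતી)"), ("gujarati", "Gujarati (ગુજરાતી)"),
      ("kn", "Kannada (ಕನ್ನಡ)"), ("kannada", "Kannada (ಕನ್ನಡ)"),
      ("ml", "Malayalam (മലയാളം)"), ("malayalam", "Malayalam (മലയാളം)"),
      ("pa", "Punjabi (ਪੰਜਾਬੀ)"), ("punjabi", "Punjabi (ਪੰਜਾਬੀ)"),
      ("es", "Spanish (Español)"), ("spanish", "Spanish (Español)"),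
      ("fr", "French (Français)"), ("french", "French (Français)"),
      ("de", "German (Deutsch)"), ("german", "German (Deutsch)"),
      ("zh", "Chinese (中文)"), ("chinese", "Chinese (中文)"),
      ("ja", "Japanese (日本語)"), ("japanese", "Japanese (日本語)"),
      ("ar", "Arabic (العربية)"), ("arabic", "Arabic (العربية)"),
      ("pt", "Portuguese (Português)"), ("portuguese", "Portuguese (Português)")] := by decide
  have el0 : PySem.Str.lower "English" = "english" := by decide
  have el1 : PySem.Str.lower "Hindi" = "hindi" := by decide
  have el2 : PySem.Str.lower "Marathi" = "marathi" := by decide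
  have el3 : PySem.Str.lower "Tamil" = "tamil" := by decide
  have el4 : PySem.Str.lower "Telugu" = "telugu" := by decide
  have el5 : PySem.Str.lower "Bengali" = "bengali" := by decide
  have el6 : PySem.Str.lower "Gujarati" = "gujarati" := by decide
  have el7 : PySem.Str.lower "Kannada" = "kannada" := by decide
  have el8 : PySem.Str.lower "Malayalam" = "malayalam" := by decide
  have el9 : PySem.Str.lower "Punjabi" = "punjabi" := by decide
  have el10 : PySem.Str.lower "Spanish" = "spanish" := by decide
  have el11 : PySem.Str.lower "French" = "french" := by decide
  have el12 : PySem.Str.lower "German" = "german" := by decide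
  have el13 : PySem.Str.lower "Chinese" = "chinese" := by decide
  have el14 : PySem.Str.lower "Japanese" = "japanese" := by decide
  have el15 : PySem.Str.lower "Arabic" = "arabic" := by decide
  have el16 : PySem.Str.lower "Portuguese" = "portuguese" := by decide
  simp [pvACore, pvBCore, pvReverseScan, eOf, eLk, pvDefaultInstruction, pvDefaultLanguage,
        PySem.Dict.get?, PySem.Dict.getD,
        el0, el1, el2, el3, el4, el5, el6, el7, el8, el9, el10, el11, el12, el13, el14, el15, el16, h0, h1, h2, h3, h4, h5, h6, h7, h8, h9, h10, h11, h12, h13, h14, h15, h16, h17, h18, h19, h20, h21, h22, h23, h24, h25, h26, h27, h28, h29, h30, h31, h32, h33]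

-- ===== VERDICT (by name: the statement is the Claim_ definition above) =====
theorem get_language_instruction_py_spec : Claim_equal_get_language_instruction_py := by
  intro lang_code _
  unfold Spec_get_language_instruction_py get_language_instruction_py get_language_instruction_py_alt pvDefaultLanguage
  exact pvCore_eq _
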